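-- pv_equiv track=rewrite | github.com/hyohyeon08/kim_baekjoon | 프로그래머스/0/181867. x 사이의 개수/x 사이의 개수.py | solution
-- ===== SOURCE A (Python) =====
-- def solution(myString):
--     answer = []
--     myString = myString.split("x")
--     for i in myString:
--         if(i):
--             answer.append(len(i))
--         else:
--             answer.append(0)
--     return answer
-- ===== SOURCE B (Python) =====
-- def solution(myString):
--     answer = []
--     cnt = 0
--     for c in myString:
--         if c == 'x':
--             answer.append(cnt)
--             cnt = 0
--         else:
--             cnt += 1
--     answer.append(cnt)
--     return answer
-- ===== Notes on version B (the rewrite author's own statement) =====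
-- stated objective: simpler
-- what changed: Replaces split('x') followed by a loop over the segment list with a single character-by-character pass that maintains a running segment-length counter, never materialising the substrings.
import Mathlib
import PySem

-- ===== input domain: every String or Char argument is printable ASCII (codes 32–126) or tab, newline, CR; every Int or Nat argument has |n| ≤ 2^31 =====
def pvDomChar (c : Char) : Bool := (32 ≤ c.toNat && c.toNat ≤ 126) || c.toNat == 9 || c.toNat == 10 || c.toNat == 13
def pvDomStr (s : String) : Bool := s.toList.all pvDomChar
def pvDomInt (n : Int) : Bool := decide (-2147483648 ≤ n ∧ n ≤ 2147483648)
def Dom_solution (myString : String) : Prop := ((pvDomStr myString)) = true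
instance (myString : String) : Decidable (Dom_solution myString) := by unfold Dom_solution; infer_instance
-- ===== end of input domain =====

-- B replaces split("x") + a loop over segments by one character pass with a running counter (simpler decomposition).


-- ===== PORT A =====
-- myString.split("x") with the nonempty literal separator "x" is PySem.Chars.splitOn on the char list
def solution (myString : String) : List Int :=
  let pieces := PySem.Chars.splitOn myString.toList ['x']
  pieces.foldl (fun answer i =>
    if i ≠ [] then answer ++ [(i.length : Int)] else answer ++ [(0 : Int)]) []

-- ===== PORT B =====
def solution_alt (myString : String) : List Int :=
  let st := myString.toList.foldl
    (fun (st : List Int × Int) c =>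
      if c = 'x' then (st.1 ++ [st.2], 0) else (st.1, st.2 + 1)) ([], 0)
  st.1 ++ [st.2]

-- ===== PRECONDITION & SPEC =====
def Spec_solution (myString : String) (out : List Int) : Prop := out = solution_alt myString
instance (myString : String) (out : List Int) : Decidable (Spec_solution myString out) := by unfold Spec_solution; infer_instance

-- ===== CLAIM (what is proved, stated in full; the proofs are below) =====
def Claim_equal_solution : Prop := ∀ (myString : String), Dom_solution myString → Spec_solution myString (solution myString)

-- ===== LEMMAS AND PROOFS =====

-- reference splitter: the list of segments of l between 'x' characters
def splitX : List Char → List (List Char)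
  | [] => [[]]
  | c :: rest =>
    if c = 'x' then [] :: splitX rest
    else
      match splitX rest with
      | [] => [[c]]
      | p :: ps => (c :: p) :: ps

theorem splitX_ne_nil (l : List Char) : splitX l ≠ [] := by
  cases l with
  | nil => simp [splitX]
  | cons c rest =>
    simp only [splitX]
    split
    · simp
    · cases h : splitX rest <;> simp

theorem go_x (fuel : Nat) (l cur : List Char) (acc : List (List Char))
    (h : l.length < fuel) :
    PySem.Chars.splitOn.go ['x'] fuel l cur acc
      = acc.reverse ++ List.modifyHead (fun p => cur.reverse ++ p) (splitX l) := by
  induction fuel generalizing l cur acc with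
  | zero => omega
  | succ n ih =>
    cases l with
    | nil => simp [PySem.Chars.splitOn.go, splitX]
    | cons c rest =>
      simp only [PySem.Chars.splitOn.go]
      by_cases hc : c = 'x'
      · subst hc
        rw [if_pos (by simp [List.isPrefixOf])]
        simp only [List.length_cons, List.drop_succ_cons, List.length_nil, List.drop_zero]
        rw [ih rest [] (cur.reverse :: acc) (by simp at h ⊢; omega)]
        simp [splitX]
        cases hs : splitX rest with
        | nil => exact absurd hs (splitX_ne_nil rest)
        | cons p ps => simp
      · rw [if_neg (by simp [List.isPrefixOf]; exact fun e => hc e.symm)]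
        rw [ih rest (c :: cur) acc (by simp at h ⊢; omega)]
        simp only [splitX, if_neg hc]
        cases hs : splitX rest with
        | nil => exact absurd hs (splitX_ne_nil rest)
        | cons p ps => simp

theorem splitOn_x (l : List Char) :
    PySem.Chars.splitOn l ['x'] = splitX l := by
  rw [PySem.Chars.splitOn, go_x l.length.succ l [] [] (Nat.lt_succ_self _)]
  cases h : splitX l with
  | nil => exact absurd h (splitX_ne_nil l)
  | cons p ps => simp

theorem foldl_lens (ps : List (List Char)) (acc : List Int) :
    ps.foldl (fun answer i =>
      if i ≠ [] then answer ++ [(i.length : Int)] else answer ++ [(0 : Int)]) acc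
      = acc ++ ps.map (fun i => (i.length : Int)) := by
  induction ps generalizing acc with
  | nil => simp
  | cons p ps ih =>
    simp only [List.foldl, List.map]
    rw [ih]
    by_cases hp : p = []
    · subst hp; simp
    · simp [hp]

theorem solution_eq (s : String) :
    solution s = (splitX s.toList).map (fun i => (i.length : Int)) := by
  simp only [solution, splitOn_x, foldl_lens, List.nil_append]

theorem b_fold (l : List Char) (acc : List Int) (cnt : Int) :
    (let st := l.foldl
      (fun (st : List Int × Int) c =>
        if c = 'x' then (st.1 ++ [st.2], 0) else (st.1, st.2 + 1)) (acc, cnt)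
     st.1 ++ [st.2])
      = acc ++ List.modifyHead (fun p => cnt + p)
          ((splitX l).map (fun i => (i.length : Int))) := by
  induction l generalizing acc cnt with
  | nil => simp [splitX]
  | cons c rest ih =>
    simp only [List.foldl]
    by_cases hc : c = 'x'
    · subst hc
      rw [if_pos rfl, ih]
      cases hs : splitX rest with
      | nil => exact absurd hs (splitX_ne_nil rest)
      | cons p ps => simp [splitX, hs]
    · rw [if_neg hc, ih]
      cases hs : splitX rest with
      | nil => exact absurd hs (splitX_ne_nil rest)
      | cons p ps =>
        simp only [splitX, if_neg hc, hs, List.map, List.modifyHead]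
        simp only [List.length_cons]
        push_cast
        ring_nf

theorem solution_alt_eq (s : String) :
    solution_alt s = (splitX s.toList).map (fun i => (i.length : Int)) := by
  have := b_fold s.toList [] 0
  simp only [solution_alt]
  rw [this]
  cases h : (splitX s.toList).map (fun i => (i.length : Int)) with
  | nil => simp
  | cons p ps => simp

-- ===== VERDICT (by name: the statement is the Claim_ definition above) =====
theorem solution_spec : Claim_equal_solution := by
  intro s _
  unfold Spec_solution
  rw [solution_eq, solution_alt_eq]
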